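-- pv_equiv track=rewrite | github.com/SanmaySarada/Astraea | src/astraea/classification/heuristic.py | detect_merge_groups
-- ===== SOURCE A (Python) =====
-- MERGE_PREFIXES: dict[str, list[str]] = {
--     "LB": ["lb_", "lab"],
--     "EG": ["eg_", "ecg"],
--     "DS": ["ds_"],
--     "EX": ["ex_"],
--     "MH": ["haemh", "mh_"],
-- }
--
-- def detect_merge_groups(dataset_names: list[str]) -> dict[str, list[str]]:
--     """Detect groups of datasets that should merge into the same SDTM domain.
--
--     Uses MERGE_PREFIXES to find datasets sharing a common prefix pattern
--     (e.g., lb_biochem, lb_hem, lb_urin all merge into LB).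
--
--     Args:
--         dataset_names: List of raw dataset filenames.
--
--     Returns:
--         Dict of domain code -> list of dataset names, only for groups with
--         2 or more datasets.
--     """
--     # Normalize names: strip extensions, lowercase
--     normalized: dict[str, str] = {}  # normalized -> original
--     for name in dataset_names:
--         norm = name.lower()
--         for ext in (".sas7bdat", ".sas7bcat", ".xpt"):
--             if norm.endswith(ext):
--                 norm = norm[: -len(ext)]
--                 break
--         normalized[norm] = name
--
--     groups: dict[str, list[str]] = {}
--
--     for domain, prefixes in MERGE_PREFIXES.items():
--         members: list[str] = []
--         for norm, original in normalized.items():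
--             for prefix in prefixes:
--                 if norm.startswith(prefix) and norm != prefix.rstrip("_"):
--                     members.append(original)
--                     break
--         if len(members) >= 2:
--             groups[domain] = sorted(members)
--
--     return groups
-- ===== SOURCE B (Python) =====
-- MERGE_PREFIXES: dict[str, list[str]] = {
--     "LB": ["lb_", "lab"],
--     "EG": ["eg_", "ecg"],
--     "DS": ["ds_"],
--     "EX": ["ex_"],
--     "MH": ["haemh", "mh_"],
-- }
--
-- def detect_merge_groups(dataset_names: list[str]) -> dict[str, list[str]]:
--     """Single-pass bucketing: classify each normalized name once, then emit
--     the domains (in table order) that collected 2+ members."""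
--     normalized: dict[str, str] = {}  # normalized -> original
--     for name in dataset_names:
--         norm = name.lower()
--         for ext in (".sas7bdat", ".sas7bcat", ".xpt"):
--             if norm.endswith(ext):
--                 norm = norm[: -len(ext)]
--                 break
--         normalized[norm] = name
--
--     buckets: dict[str, list[str]] = {}
--     for norm, original in normalized.items():
--         for domain, prefixes in MERGE_PREFIXES.items():
--             if any(norm.startswith(p) and norm != p.rstrip("_") for p in prefixes):
--                 buckets.setdefault(domain, []).append(original)
--                 break
--
--     return {
--         domain: sorted(buckets[domain])
--         for domain in MERGE_PREFIXES
--         if len(buckets.get(domain, [])) >= 2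
--     }
-- ===== Notes on version B (the rewrite author's own statement) =====
-- stated objective: alternative
-- what changed: A scans the whole normalized dict once per domain (five passes, one per MERGE_PREFIXES entry); B makes a single bucketing pass over the normalized items, classifying each name once into its (unique) matching domain, then emits domains with 2+ members in table order.
import Mathlib
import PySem

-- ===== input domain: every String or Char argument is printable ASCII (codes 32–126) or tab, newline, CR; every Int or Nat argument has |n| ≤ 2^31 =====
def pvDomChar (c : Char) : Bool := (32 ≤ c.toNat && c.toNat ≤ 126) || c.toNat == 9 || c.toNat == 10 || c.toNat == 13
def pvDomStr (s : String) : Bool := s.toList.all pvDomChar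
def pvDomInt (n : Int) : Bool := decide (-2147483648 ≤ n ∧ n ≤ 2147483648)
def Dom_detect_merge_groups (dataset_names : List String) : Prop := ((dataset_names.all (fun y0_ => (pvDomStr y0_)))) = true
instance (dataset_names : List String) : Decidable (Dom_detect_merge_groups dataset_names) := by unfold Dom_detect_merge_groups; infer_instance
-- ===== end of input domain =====

-- B replaces A's five per-domain scans of the normalized dict by ONE bucketing pass that
-- classifies each normalized name once; same return value (alternative decomposition).

-- MERGE_PREFIXES, a module constant (dict → association list, insertion order)
def pvMergePrefixes : List (String × List String) :=
  [("LB", ["lb_", "lab"]), ("EG", ["eg_", "ecg"]), ("DS", ["ds_"]), ("EX", ["ex_"]), ("MH", ["haemh", "mh_"])]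

-- p.rstrip("_") ported by hand: drop trailing '_' characters (exact: rstrip with an
-- explicit character set removes exactly the trailing characters of that set)
def pvRstripU (p : String) : String :=
  String.ofList ((p.toList.reverse.dropWhile (· == '_')).reverse)

-- the per-prefix test `norm.startswith(prefix) and norm != prefix.rstrip("_")`,
-- shared verbatim by both Pythons
def pvCond (norm p : String) : Bool :=
  PySem.Str.startswith norm p && !(norm == pvRstripU p)

-- the inner `for ext in (...): … break` loop of the shared normalization code
def pvStripExt : List String → String → String
  | [], n => n
  | e :: es, n =>
      if PySem.Str.endswith n e then PySem.Str.slice n none (some (-(PySem.Str.len e : Int)))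
      else pvStripExt es n

-- the `normalized` dict; this loop is LITERALLY IDENTICAL in A and in B (Source B), so both
-- ports share this one transliteration of it
def pvNormalize (dataset_names : List String) : PySem.Dict String String :=
  dataset_names.foldl
    (fun d name => d.insert (pvStripExt [".sas7bdat", ".sas7bcat", ".xpt"] (PySem.Str.lower name)) name)
    PySem.Dict.empty

-- ===== PORT A =====
-- A's innermost `for prefix in prefixes: if …: members.append(original); break`
-- (returns whether the append happened)
def pvMatchLoop (norm : String) : List String → Bool
  | [] => false
  | p :: ps => if pvCond norm p then true else pvMatchLoop norm ps

-- A's middle loop `for norm, original in normalized.items(): …` building `members`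
def pvMembers (prefixes : List String) (items : List (String × String)) : List String :=
  items.foldl (fun ms pr => if pvMatchLoop pr.1 prefixes then ms ++ [pr.2] else ms) []

def detect_merge_groups (dataset_names : List String) : List (String × List String) :=
  let normalized := pvNormalize dataset_names
  let groups :=
    pvMergePrefixes.foldl
      (fun g dp =>
        let members := pvMembers dp.2 normalized.items
        if 2 ≤ members.length then g.insert dp.1 (PySem.List.sorted members (fun x => x) false) else g)
      PySem.Dict.empty
  groups.items

-- ===== PORT B =====
-- B's `for domain, prefixes in MERGE_PREFIXES.items(): if any(...): …; break`
def pvFindDomain (norm : String) : List (String × List String) → Option String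
  | [] => none
  | (d, ps) :: rest =>
      if ps.any (pvCond norm) then some d else pvFindDomain norm rest

-- B's single bucketing pass (`buckets.setdefault(domain, []).append(original)`)
def pvBuckets (items : List (String × String)) : PySem.Dict String (List String) :=
  items.foldl
    (fun b pr =>
      match pvFindDomain pr.1 pvMergePrefixes with
      | some d => b.modify d [] (· ++ [pr.2])
      | none => b)
    PySem.Dict.empty

def detect_merge_groups_alt (dataset_names : List String) : List (String × List String) :=
  let normalized := pvNormalize dataset_names
  let buckets := pvBuckets normalized.items
  -- the final dict comprehension iterates MERGE_PREFIXES' (distinct) keys, so it appends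
  (pvMergePrefixes.map (·.1)).foldl
    (fun out d =>
      if 2 ≤ (buckets.getD d []).length then
        out ++ [(d, PySem.List.sorted (buckets.getD d []) (fun x => x) false)]
      else out)
    []

-- ===== PRECONDITION & SPEC =====
def Spec_detect_merge_groups (dataset_names : List String) (out : List (String × List String)) : Prop := out = detect_merge_groups_alt dataset_names
instance (dataset_names : List String) (out : List (String × List String)) : Decidable (Spec_detect_merge_groups dataset_names out) := by unfold Spec_detect_merge_groups; infer_instance

-- ===== CLAIM (what is proved, stated in full; the proofs are below) =====
def Claim_equal_detect_merge_groups : Prop := ∀ (dataset_names : List String), Dom_detect_merge_groups dataset_names → Spec_detect_merge_groups dataset_names (detect_merge_groups dataset_names)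

-- ===== LEMMAS AND PROOFS =====

theorem matchLoop_eq_any (norm : String) (ps : List String) :
    pvMatchLoop norm ps = ps.any (pvCond norm) := by
  induction ps with
  | nil => rfl
  | cons p ps ih => simp only [pvMatchLoop, List.any_cons, ih]; split_ifs <;> simp_all

-- two families of prefix literals, none a prefix of one another, never both match
theorem cond_excl (norm : String) (ps qs : List String)
    (h : ∀ p ∈ ps, ∀ q ∈ qs, ¬ p.toList <+: q.toList ∧ ¬ q.toList <+: p.toList) :
    ¬(ps.any (pvCond norm) = true ∧ qs.any (pvCond norm) = true) := by
  rintro ⟨h1, h2⟩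
  simp only [List.any_eq_true] at h1 h2
  obtain ⟨p, hp, hcp⟩ := h1
  obtain ⟨q, hq, hcq⟩ := h2
  simp only [pvCond, Bool.and_eq_true] at hcp hcq
  have hps : p.toList <+: norm.toList := (PySem.Chars.startswith_iff _ _).mp (by simpa using hcp.1)
  have hqs : q.toList <+: norm.toList := (PySem.Chars.startswith_iff _ _).mp (by simpa using hcq.1)
  rcases List.prefix_or_prefix_of_prefix hps hqs with hc | hc
  · exact (h p hp q hq).1 hc
  · exact (h p hp q hq).2 hc

-- A's member loop is a filter over the items
theorem members_eq (ps : List String) (L : List (String × String)) :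
    pvMembers ps L = ((L.filter (fun pr => pvMatchLoop pr.1 ps)).map (·.2)) := by
  have aux : ∀ (L : List (String × String)) (acc : List String),
      L.foldl (fun ms pr => if pvMatchLoop pr.1 ps then ms ++ [pr.2] else ms) acc
        = acc ++ ((L.filter (fun pr => pvMatchLoop pr.1 ps)).map (·.2)) := by
    intro L
    induction L with
    | nil => simp
    | cons pr L ih =>
        intro acc
        simp only [List.foldl_cons, List.filter_cons]
        split_ifs with h <;> simp [ih]
  exact aux L []

-- B's bucket for a given domain collects exactly the items that classify to it
theorem buckets_getD (L : List (String × String)) (d : String) :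
    (pvBuckets L).getD d []
      = ((L.filter (fun pr => pvFindDomain pr.1 pvMergePrefixes == some d)).map (·.2)) := by
  have aux : ∀ (L : List (String × String)) (b : PySem.Dict String (List String)),
      (L.foldl
        (fun b pr =>
          match pvFindDomain pr.1 pvMergePrefixes with
          | some d' => b.modify d' [] (· ++ [pr.2])
          | none => b) b).getD d []
        = b.getD d [] ++ ((L.filter (fun pr => pvFindDomain pr.1 pvMergePrefixes == some d)).map (·.2)) := by
    intro L
    induction L with
    | nil => simp
    | cons pr L ih =>
        intro b
        simp only [List.foldl_cons, List.filter_cons]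
        cases hf : pvFindDomain pr.1 pvMergePrefixes with
        | none => simp [ih]
        | some d' =>
            by_cases hd : d' = d
            · subst hd
              simp [ih, PySem.Dict.getD_modify_self]
            · have hd' : d ≠ d' := Ne.symm hd
              simp [ih, PySem.Dict.getD_modify, hd, hd']
  simpa [pvBuckets] using aux L PySem.Dict.empty

-- classification agrees with A's per-domain test, domain by domain
theorem find_LB (norm : String) :
    (pvFindDomain norm pvMergePrefixes == some "LB") = (["lb_", "lab"].any (pvCond norm)) := by
  simp only [pvMergePrefixes, pvFindDomain]
  cases h1 : (["lb_", "lab"].any (pvCond norm)) <;>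
  cases h2 : (["eg_", "ecg"].any (pvCond norm)) <;>
  cases h3 : (["ds_"].any (pvCond norm)) <;>
  cases h4 : (["ex_"].any (pvCond norm)) <;>
  cases h5 : (["haemh", "mh_"].any (pvCond norm)) <;> simp_all

theorem find_EG (norm : String) :
    (pvFindDomain norm pvMergePrefixes == some "EG") = (["eg_", "ecg"].any (pvCond norm)) := by
  have e := cond_excl norm ["lb_", "lab"] ["eg_", "ecg"] (by decide)
  simp only [pvMergePrefixes, pvFindDomain]
  cases h1 : (["lb_", "lab"].any (pvCond norm)) <;>
  cases h2 : (["eg_", "ecg"].any (pvCond norm)) <;>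
  cases h3 : (["ds_"].any (pvCond norm)) <;>
  cases h4 : (["ex_"].any (pvCond norm)) <;>
  cases h5 : (["haemh", "mh_"].any (pvCond norm)) <;> simp_all

theorem find_DS (norm : String) :
    (pvFindDomain norm pvMergePrefixes == some "DS") = (["ds_"].any (pvCond norm)) := by
  have e1 := cond_excl norm ["lb_", "lab"] ["ds_"] (by decide)
  have e2 := cond_excl norm ["eg_", "ecg"] ["ds_"] (by decide)
  simp only [pvMergePrefixes, pvFindDomain]
  cases h1 : (["lb_", "lab"].any (pvCond norm)) <;>
  cases h2 : (["eg_", "ecg"].any (pvCond norm)) <;>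
  cases h3 : (["ds_"].any (pvCond norm)) <;>
  cases h4 : (["ex_"].any (pvCond norm)) <;>
  cases h5 : (["haemh", "mh_"].any (pvCond norm)) <;> simp_all

theorem find_EX (norm : String) :
    (pvFindDomain norm pvMergePrefixes == some "EX") = (["ex_"].any (pvCond norm)) := by
  have e1 := cond_excl norm ["lb_", "lab"] ["ex_"] (by decide)
  have e2 := cond_excl norm ["eg_", "ecg"] ["ex_"] (by decide)
  have e3 := cond_excl norm ["ds_"] ["ex_"] (by decide)
  simp only [pvMergePrefixes, pvFindDomain]
  cases h1 : (["lb_", "lab"].any (pvCond norm)) <;>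
  cases h2 : (["eg_", "ecg"].any (pvCond norm)) <;>
  cases h3 : (["ds_"].any (pvCond norm)) <;>
  cases h4 : (["ex_"].any (pvCond norm)) <;>
  cases h5 : (["haemh", "mh_"].any (pvCond norm)) <;> simp_all

theorem find_MH (norm : String) :
    (pvFindDomain norm pvMergePrefixes == some "MH") = (["haemh", "mh_"].any (pvCond norm)) := by
  have e1 := cond_excl norm ["lb_", "lab"] ["haemh", "mh_"] (by decide)
  have e2 := cond_excl norm ["eg_", "ecg"] ["haemh", "mh_"] (by decide)
  have e3 := cond_excl norm ["ds_"] ["haemh", "mh_"] (by decide)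
  have e4 := cond_excl norm ["ex_"] ["haemh", "mh_"] (by decide)
  simp only [pvMergePrefixes, pvFindDomain]
  cases h1 : (["lb_", "lab"].any (pvCond norm)) <;>
  cases h2 : (["eg_", "ecg"].any (pvCond norm)) <;>
  cases h3 : (["ds_"].any (pvCond norm)) <;>
  cases h4 : (["ex_"].any (pvCond norm)) <;>
  cases h5 : (["haemh", "mh_"].any (pvCond norm)) <;> simp_all

-- bucket = members, per domain
theorem bucket_members (L : List (String × String)) (d : String) (ps : List String)
    (hfind : ∀ norm, (pvFindDomain norm pvMergePrefixes == some d) = ps.any (pvCond norm)) :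
    (pvBuckets L).getD d [] = pvMembers ps L := by
  rw [buckets_getD, members_eq]
  congr 1
  apply List.filter_congr
  intro pr _
  rw [hfind, matchLoop_eq_any]

-- ===== VERDICT (by name: the statement is the Claim_ definition above) =====
theorem detect_merge_groups_spec : Claim_equal_detect_merge_groups := by
  intro names _
  unfold Spec_detect_merge_groups detect_merge_groups detect_merge_groups_alt
  have hLB := bucket_members (pvNormalize names).items "LB" ["lb_", "lab"] find_LB
  have hEG := bucket_members (pvNormalize names).items "EG" ["eg_", "ecg"] find_EG
  have hDS := bucket_members (pvNormalize names).items "DS" ["ds_"] find_DS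
  have hEX := bucket_members (pvNormalize names).items "EX" ["ex_"] find_EX
  have hMH := bucket_members (pvNormalize names).items "MH" ["haemh", "mh_"] find_MH
  simp only [pvMergePrefixes, List.foldl, List.map, hLB, hEG, hDS, hEX, hMH]
  split_ifs <;>
    simp [PySem.Dict.insert, PySem.Dict.empty, PySem.Dict.contains]
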